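-- pv_equiv track=rewrite | github.com/dinyarislam/Python-Code-Samples | HW06.py | courseRosters
-- ===== SOURCE A (Python) =====
-- def courseRosters(studentdata):
--     coursedict = {}
--     courselist = []
--     for info in studentdata:
--         for course in info[2]:
--             if course not in courselist:
--                 courselist.append(course)
--     for course in courselist:
--         majordict = {}
--         for info in studentdata:
--             if course in info[2]:
--                 try:
--                     majordict[info[1]] += [info[0]]
--                 except:
--                     majordict[info[1]] = []
--                     majordict[info[1]].append(info[0])
--         coursedict[course] = majordict
--     return coursedict
-- ===== SOURCE B (Python) =====
-- def courseRosters(studentdata):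
--     coursedict = {}
--     for info in studentdata:
--         for course in dict.fromkeys(info[2]):
--             coursedict.setdefault(course, {}).setdefault(info[1], []).append(info[0])
--     return coursedict
-- ===== Notes on version B (the rewrite author's own statement) =====
-- stated objective: faster
-- what changed: Replaced A's two-phase structure (collect distinct courses, then rescan all of studentdata once per course) by a single pass over studentdata that builds the nested course->major->ids dict incrementally, deduplicating each student's course list to add an id at most once per course.
import Mathlib
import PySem

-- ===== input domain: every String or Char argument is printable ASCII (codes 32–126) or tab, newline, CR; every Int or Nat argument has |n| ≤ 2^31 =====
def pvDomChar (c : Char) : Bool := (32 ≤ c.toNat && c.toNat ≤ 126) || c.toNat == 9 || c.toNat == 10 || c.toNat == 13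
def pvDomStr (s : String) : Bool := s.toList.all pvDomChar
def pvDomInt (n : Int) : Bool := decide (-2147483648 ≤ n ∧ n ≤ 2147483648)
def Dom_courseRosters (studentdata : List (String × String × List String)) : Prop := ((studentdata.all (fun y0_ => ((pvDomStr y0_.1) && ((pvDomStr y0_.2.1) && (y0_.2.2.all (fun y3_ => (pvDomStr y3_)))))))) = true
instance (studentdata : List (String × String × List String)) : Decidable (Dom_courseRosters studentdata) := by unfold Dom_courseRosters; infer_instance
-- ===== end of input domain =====

-- B replaces A's collect-courses-then-rescan-studentdata-once-per-course structure by a single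
-- incremental pass over studentdata building the nested course→major→ids dict directly (faster).

-- ===== PORT A =====
-- A's first double loop: collect the distinct courses in first-appearance order
def pvACourses (studentdata : List (String × String × List String)) : List String :=
  studentdata.foldl
    (fun cl info => info.2.2.foldl (fun cl course => if course ∈ cl then cl else cl ++ [course]) cl) []

-- A's inner loop: the majordict for one course; the try/except is a match on get?
-- (except sets majordict[info[1]] = [] and then appends info[0] in place)
def pvAMajor (studentdata : List (String × String × List String)) (course : String) :
    PySem.Dict String (List String) :=
  studentdata.foldl
    (fun md info =>
      if course ∈ info.2.2 then
        match md.get? info.2.1 with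
        | some l => md.insert info.2.1 (l ++ [info.1])
        | none => (md.insert info.2.1 []).modify info.2.1 [] (fun l => l ++ [info.1])
      else md)
    PySem.Dict.empty

def courseRosters (studentdata : List (String × String × List String)) :
    List (String × List (String × List String)) :=
  (((pvACourses studentdata).foldl
      (fun cd course => cd.insert course (pvAMajor studentdata course))
      (PySem.Dict.empty : PySem.Dict String (PySem.Dict String (List String)))).items).map
    (fun p => (p.1, p.2.items))

-- ===== PORT B =====
-- one student: for each course of dict.fromkeys(info[2]) (= PySem.List.dedup),
-- coursedict.setdefault(course, {}).setdefault(info[1], []).append(info[0]);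
-- setdefault followed by in-place mutation of the returned value is Dict.modify with that default
def pvBStep (cd : PySem.Dict String (PySem.Dict String (List String)))
    (info : String × String × List String) :
    PySem.Dict String (PySem.Dict String (List String)) :=
  (PySem.List.dedup info.2.2).foldl
    (fun cd course =>
      cd.modify course PySem.Dict.empty
        (fun inner => inner.modify info.2.1 [] (fun l => l ++ [info.1]))) cd

def courseRosters_alt (studentdata : List (String × String × List String)) :
    List (String × List (String × List String)) :=
  ((studentdata.foldl pvBStep
      (PySem.Dict.empty : PySem.Dict String (PySem.Dict String (List String)))).items).map
    (fun p => (p.1, p.2.items))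

-- ===== PRECONDITION & SPEC =====
def Spec_courseRosters (studentdata : List (String × String × List String)) (out : List (String × List (String × List String))) : Prop := out = courseRosters_alt studentdata
instance (studentdata : List (String × String × List String)) (out : List (String × List (String × List String))) : Decidable (Spec_courseRosters studentdata out) := by unfold Spec_courseRosters; infer_instance

-- ===== CLAIM =====
def Claim_equal_courseRosters : Prop := ∀ (studentdata : List (String × String × List String)), Dom_courseRosters studentdata → Spec_courseRosters studentdata (courseRosters studentdata)

-- ===== LEMMAS AND PROOFS =====

-- A's try/except append-or-create equals B's nested setdefault-append (one Dict.modify)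
theorem pvUpd_eq (md : PySem.Dict String (List String)) (m id : String) :
    (match md.get? m with
     | some l => md.insert m (l ++ [id])
     | none => (md.insert m []).modify m [] (fun l => l ++ [id]))
      = md.modify m [] (fun l => l ++ [id]) := by
  cases h : md.get? m with
  | some l =>
    show md.insert m (l ++ [id]) = md.insert m (md.getD m [] ++ [id])
    rw [PySem.Dict.getD_of_get?_eq_some md [] h]
  | none =>
    show (md.insert m []).insert m ((md.insert m []).getD m [] ++ [id])
        = md.insert m (md.getD m [] ++ [id])
    rw [PySem.Dict.getD_insert_self, PySem.Dict.insert_insert_self,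
      PySem.Dict.getD_of_get?_eq_none md [] h]

-- A's membership-append step is PySem.Set.add
theorem pvIns_eq_add (cl : List String) (c : String) :
    (if c ∈ cl then cl else cl ++ [c]) = PySem.Set.add cl c := by
  rw [PySem.Set.add_eq_ite]

theorem pvACourses_eq_update (studentdata : List (String × String × List String)) :
    pvACourses studentdata
      = studentdata.foldl (fun cl info => PySem.Set.update cl info.2.2) [] := by
  unfold pvACourses
  simp only [pvIns_eq_add]
  rfl

theorem pvACourses_nodup (studentdata : List (String × String × List String)) :
    (pvACourses studentdata).Nodup := by
  rw [pvACourses_eq_update]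
  generalize h : ([] : List String) = acc
  have hacc : acc.Nodup := h ▸ List.nodup_nil
  clear h
  induction studentdata generalizing acc with
  | nil => exact hacc
  | cons x l ih => exact ih _ (PySem.Set.nodup_update _ _ hacc)

-- getD through a fold of modifies over a Nodup key list
theorem pvGetD_foldl_modify {ν : Type} (l : List String) (hl : l.Nodup)
    (d0 : ν) (f : ν → ν) (cd : PySem.Dict String ν) (c : String) :
    (l.foldl (fun cd k => cd.modify k d0 f) cd).getD c d0
      = if c ∈ l then f (cd.getD c d0) else cd.getD c d0 := by
  induction l generalizing cd with
  | nil => simp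
  | cons x l ih =>
    simp only [List.foldl_cons, List.mem_cons]
    rw [ih hl.of_cons]
    by_cases hc : c = x
    · subst hc
      have hnl : c ∉ l := (List.nodup_cons.mp hl).1
      simp [hnl]
    · simp [hc, PySem.Dict.getD_modify]

theorem pvUpdate_ofList (s : PySem.Set String) (xs : List String) :
    PySem.Set.update s (PySem.Set.ofList xs) = PySem.Set.update s xs := by
  rw [PySem.Set.update_eq_append_filter, PySem.Set.update_eq_append_filter,
    PySem.Set.ofList_ofList]

theorem pvKeys_bStep (cd : PySem.Dict String (PySem.Dict String (List String)))
    (info : String × String × List String) :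
    (pvBStep cd info).keys = PySem.Set.update cd.keys info.2.2 := by
  unfold pvBStep
  rw [PySem.Dict.keys_foldl_modify (PySem.List.dedup info.2.2) PySem.Dict.empty
      (fun _ _ => fun inner => inner.modify info.2.1 [] (fun l => l ++ [info.1])) cd,
    PySem.List.dedup_eq_ofList, pvUpdate_ofList]

theorem pvKeys_foldl_bStep (s : List (String × String × List String))
    (cd : PySem.Dict String (PySem.Dict String (List String))) :
    (s.foldl pvBStep cd).keys
      = s.foldl (fun ks info => PySem.Set.update ks info.2.2) cd.keys := by
  induction s generalizing cd with
  | nil => rfl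
  | cons info s ih => simp only [List.foldl_cons, ih, pvKeys_bStep]

theorem pvGetD_bStep (cd : PySem.Dict String (PySem.Dict String (List String)))
    (info : String × String × List String) (c : String) :
    (pvBStep cd info).getD c PySem.Dict.empty
      = if c ∈ info.2.2 then
          (cd.getD c PySem.Dict.empty).modify info.2.1 [] (fun l => l ++ [info.1])
        else cd.getD c PySem.Dict.empty := by
  unfold pvBStep
  rw [pvGetD_foldl_modify (PySem.List.dedup info.2.2)
      (by rw [PySem.List.dedup_eq_ofList]; exact PySem.Set.nodup_ofList _)]
  simp

theorem pvAMajor_append (s : List (String × String × List String))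
    (info : String × String × List String) (c : String) :
    pvAMajor (s ++ [info]) c
      = if c ∈ info.2.2 then (pvAMajor s c).modify info.2.1 [] (fun l => l ++ [info.1])
        else pvAMajor s c := by
  unfold pvAMajor
  rw [List.foldl_append]
  simp only [List.foldl_cons, List.foldl_nil]
  split_ifs with h
  · exact pvUpd_eq _ _ _
  · rfl

-- B's accumulated value at course c after a prefix s is exactly A's majordict for c over s
theorem pvGetD_foldl_bStep (s : List (String × String × List String)) (c : String) :
    ((s.foldl pvBStep (PySem.Dict.empty : PySem.Dict String (PySem.Dict String (List String)))).getD
        c PySem.Dict.empty)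
      = pvAMajor s c := by
  induction s using List.reverseRecOn with
  | nil => rfl
  | append_singleton s info ih =>
    rw [List.foldl_append]
    simp only [List.foldl_cons, List.foldl_nil]
    rw [pvGetD_bStep, ih, pvAMajor_append]

-- ===== VERDICT (by name: the statement is the Claim_ definition above) =====
theorem courseRosters_spec : Claim_equal_courseRosters := by
  intro s _
  show courseRosters s = courseRosters_alt s
  unfold courseRosters courseRosters_alt
  have hCL := pvACourses_nodup s
  have hA : ((pvACourses s).foldl
      (fun cd course => cd.insert course (pvAMajor s course))
      (PySem.Dict.empty : PySem.Dict String (PySem.Dict String (List String)))).items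
      = (pvACourses s).map (fun c => (c, pvAMajor s c)) := by
    have := PySem.Dict.items_foldl_insert_fresh (pvACourses s) (fun c => c)
      (fun c => pvAMajor s c)
      (PySem.Dict.empty : PySem.Dict String (PySem.Dict String (List String)))
      (by intro a _; simp) (by simpa using hCL)
    simpa using this
  have hkeys : (s.foldl pvBStep
      (PySem.Dict.empty : PySem.Dict String (PySem.Dict String (List String)))).keys
      = pvACourses s := by
    rw [pvKeys_foldl_bStep, pvACourses_eq_update, PySem.Dict.keys_empty]
  have hB : (s.foldl pvBStep
      (PySem.Dict.empty : PySem.Dict String (PySem.Dict String (List String)))).items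
      = (pvACourses s).map (fun c => (c, pvAMajor s c)) := by
    rw [PySem.Dict.items_eq_map_keys _ (hkeys ▸ hCL) PySem.Dict.empty, hkeys]
    simp only [pvGetD_foldl_bStep]
  rw [hA, hB]
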